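-- pv_equiv track=rewrite | github.com/rotemarie/chessboard-recon | inference/pipeline.py | _normalize_fen_rank
-- ===== SOURCE A (Python) =====
-- def _normalize_fen_rank(rank: str) -> str:
--     normalized = []
--     empty = 0
--     for char in rank:
--         if char.isdigit():
--             empty += int(char)
--         elif char == "?":
--             empty += 1
--         else:
--             if empty:
--                 normalized.append(str(empty))
--                 empty = 0
--             normalized.append(char)
--     if empty:
--         normalized.append(str(empty))
--     return "".join(normalized)
-- ===== SOURCE B (Python) =====
-- def _normalize_fen_rank(rank: str) -> str:
--     def is_empty(c):
--         return c.isdigit() or c == "?"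
--     out = []
--     i = 0
--     n = len(rank)
--     while i < n:
--         if is_empty(rank[i]):
--             total = 0
--             while i < n and is_empty(rank[i]):
--                 total += 1 if rank[i] == "?" else int(rank[i])
--                 i += 1
--             if total:
--                 out.append(str(total))
--         else:
--             j = i
--             while j < n and not is_empty(rank[j]):
--                 j += 1
--             out.append(rank[i:j])
--             i = j
--     return "".join(out)
-- ===== Notes on version B (the rewrite author's own statement) =====
-- stated objective: alternative
-- what changed: B scans the rank run by run (an inner loop consumes each maximal run of empty markers and sums it, another consumes each maximal run of piece characters and appends it as one slice), instead of A's single per-character loop threading a pending-empties accumulator across iterations.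
import Mathlib
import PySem

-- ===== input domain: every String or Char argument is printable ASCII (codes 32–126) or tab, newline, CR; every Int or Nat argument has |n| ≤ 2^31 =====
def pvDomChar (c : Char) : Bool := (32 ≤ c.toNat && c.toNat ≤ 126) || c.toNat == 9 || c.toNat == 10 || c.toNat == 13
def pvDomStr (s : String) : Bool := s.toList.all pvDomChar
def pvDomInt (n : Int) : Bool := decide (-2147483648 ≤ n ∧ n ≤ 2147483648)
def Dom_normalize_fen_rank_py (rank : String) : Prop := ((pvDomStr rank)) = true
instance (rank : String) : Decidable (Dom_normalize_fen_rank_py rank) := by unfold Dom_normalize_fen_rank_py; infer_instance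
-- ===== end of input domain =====

-- B replaces A's single per-character loop with a pending-empties accumulator by a
-- run-by-run scan (inner loops consume maximal runs); objective: alternative decomposition.

-- ===== PORT A =====
-- the for-loop: state = (normalized : list of string pieces as char lists, empty : Int)
def nfrA_loop : List Char → List (List Char) → Int → List (List Char) × Int
  | [], acc, empty => (acc, empty)
  | c :: cs, acc, empty =>
    if PySem.Chars.isdigit c then
      -- int(char): exact here, the guard guarantees a single ASCII digit on Dom
      nfrA_loop cs acc (empty + (PySem.Int.ofChars? [c]).getD 0)
    else if c == '?' then
      nfrA_loop cs acc (empty + 1)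
    else
      nfrA_loop cs ((if empty ≠ 0 then acc ++ [PySem.Int.toChars empty] else acc) ++ [[c]]) 0

def normalize_fen_rank_py (rank : String) : String :=
  let st := nfrA_loop rank.toList [] 0
  String.ofList (PySem.Chars.join [] (if st.2 ≠ 0 then st.1 ++ [PySem.Int.toChars st.2] else st.1))

-- ===== PORT B =====
def nfrB_isEmpty (c : Char) : Bool := PySem.Chars.isdigit c || c == '?'

-- the outer while loop; each arm's inner while loop is the takeWhile/dropWhile pair
def nfrB_go : List Char → List (List Char)
  | [] => []
  | c :: cs =>
    if nfrB_isEmpty c then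
      let run := (c :: cs).takeWhile nfrB_isEmpty
      let total := run.foldl (fun a d => a + (if d == '?' then 1 else (PySem.Int.ofChars? [d]).getD 0)) 0
      (if total ≠ 0 then [PySem.Int.toChars total] else []) ++
        nfrB_go ((c :: cs).dropWhile nfrB_isEmpty)
    else
      (c :: cs).takeWhile (fun d => !nfrB_isEmpty d) ::
        nfrB_go ((c :: cs).dropWhile (fun d => !nfrB_isEmpty d))
  termination_by l => l.length
  decreasing_by
  · rename_i h
    simp only [List.dropWhile_cons, h, if_true, List.length_cons, Nat.lt_succ_iff]
    exact List.length_dropWhile_le ..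
  · rename_i h
    simp only [List.dropWhile_cons, h, Bool.not_false, if_true, List.length_cons, Nat.lt_succ_iff]
    exact List.length_dropWhile_le ..

def normalize_fen_rank_py_alt (rank : String) : String :=
  String.ofList (PySem.Chars.join [] (nfrB_go rank.toList))

-- ===== PRECONDITION & SPEC =====
def Spec_normalize_fen_rank_py (rank : String) (out : String) : Prop := out = normalize_fen_rank_py_alt rank
instance (rank : String) (out : String) : Decidable (Spec_normalize_fen_rank_py rank out) := by unfold Spec_normalize_fen_rank_py; infer_instance

-- ===== CLAIM (what is proved, stated in full; the proofs are below) =====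
def Claim_equal_normalize_fen_rank_py : Prop := ∀ (rank : String), Dom_normalize_fen_rank_py rank → Spec_normalize_fen_rank_py rank (normalize_fen_rank_py rank)

-- ===== LEMMAS AND PROOFS =====

-- per-character increment both programs add for an empty-marker character
def pvVal (c : Char) : Int := if c == '?' then 1 else (PySem.Int.ofChars? [c]).getD 0

-- A's final flush, as a function of the loop state
def nfrA_fin (st : List (List Char) × Int) : List Char :=
  (if st.2 ≠ 0 then st.1 ++ [PySem.Int.toChars st.2] else st.1).flatten

-- the emitted tail of the output, given the characters still to process and the pending count
def pvRest : List Char → Int → List Char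
  | [], e => if e ≠ 0 then PySem.Int.toChars e else []
  | c :: cs, e =>
    if nfrB_isEmpty c then pvRest cs (e + pvVal c)
    else (if e ≠ 0 then PySem.Int.toChars e else []) ++ c :: pvRest cs 0

theorem pvJoinNil (parts : List (List Char)) : PySem.Chars.join [] parts = parts.flatten := by
  show List.intercalate [] parts = _
  induction parts with
  | nil => rfl
  | cons p ps ih =>
    cases ps with
    | nil => simp [List.intercalate]
    | cons q qs => simp_all [List.intercalate, List.intersperse]

theorem isdigit_ne_q {c : Char} (h : PySem.Chars.isdigit c = true) : (c == '?') = false := by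
  cases hq : c == '?' with
  | false => rfl
  | true => rw [eq_of_beq hq] at h; exact absurd h (by decide)

theorem nfrA_char (l : List Char) : ∀ (acc : List (List Char)) (e : Int),
    nfrA_fin (nfrA_loop l acc e) = acc.flatten ++ pvRest l e := by
  induction l with
  | nil =>
    intro acc e
    simp only [nfrA_loop, nfrA_fin, pvRest]
    split <;> simp
  | cons c cs ih =>
    intro acc e
    by_cases hd : PySem.Chars.isdigit c
    · have hq := isdigit_ne_q hd
      simp only [nfrA_loop, hd, if_true, ih, pvRest, nfrB_isEmpty, Bool.true_or, pvVal, hq,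
        Bool.false_eq_true, if_false]
    · by_cases hq : c == '?'
      · simp only [nfrA_loop, hd, Bool.false_eq_true, if_false, hq, if_true, ih, pvRest,
          nfrB_isEmpty, Bool.or_true, pvVal]
      · simp only [nfrA_loop, hd, hq, Bool.false_eq_true, if_false, ih, pvRest, nfrB_isEmpty,
          Bool.or_self]
        split <;> simp

theorem pvRest_empty_run : ∀ (run t : List Char) (e : Int), (∀ c ∈ run, nfrB_isEmpty c) →
    pvRest (run ++ t) e = pvRest t (run.foldl (fun a d => a + pvVal d) e) := by
  intro run
  induction run with
  | nil => simp
  | cons c cs ih =>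
    intro t e h
    have hc : nfrB_isEmpty c := h c (by simp)
    simp [pvRest, hc, ih t _ (fun d hd => h d (by simp [hd]))]

theorem pvRest_flush : ∀ (t : List Char) (e : Int),
    (t = [] ∨ ∃ c cs, t = c :: cs ∧ nfrB_isEmpty c = false) →
    pvRest t e = (if e ≠ 0 then PySem.Int.toChars e else []) ++ pvRest t 0 := by
  rintro t e (rfl | ⟨c, cs, rfl, hc⟩)
  · simp [pvRest]
  · simp [pvRest, hc]

theorem pvRest_piece_run : ∀ (run t : List Char), (∀ c ∈ run, nfrB_isEmpty c = false) →
    pvRest (run ++ t) 0 = run ++ pvRest t 0 := by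
  intro run
  induction run with
  | nil => simp
  | cons c cs ih =>
    intro t h
    have hc : nfrB_isEmpty c = false := h c (by simp)
    simp [pvRest, hc, ih t (fun d hd => h d (by simp [hd]))]

theorem dropWhile_head_spec (p : Char → Bool) (l : List Char) :
    l.dropWhile p = [] ∨ ∃ c cs, l.dropWhile p = c :: cs ∧ p c = false := by
  induction l with
  | nil => left; rfl
  | cons c cs ih =>
    by_cases h : p c
    · simpa [h] using ih
    · right; exact ⟨c, cs, by simp [List.dropWhile_cons, h], by simpa using h⟩

theorem nfrB_char (l : List Char) : (nfrB_go l).flatten = pvRest l 0 := by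
  induction l using nfrB_go.induct with
  | case1 => simp [nfrB_go, pvRest]
  | case2 c cs hc ih =>
    rw [nfrB_go]
    simp only [hc, if_true]
    have hsplit : (c :: cs).takeWhile nfrB_isEmpty ++ (c :: cs).dropWhile nfrB_isEmpty = c :: cs :=
      List.takeWhile_append_dropWhile (p := nfrB_isEmpty) (l := c :: cs)
    have hall : ∀ d ∈ (c :: cs).takeWhile nfrB_isEmpty, nfrB_isEmpty d :=
      fun d hd => List.mem_takeWhile_imp hd
    rw [List.flatten_append, ih]
    conv_rhs => rw [← hsplit, pvRest_empty_run _ _ 0 hall,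
      pvRest_flush _ _ (dropWhile_head_spec nfrB_isEmpty (c :: cs))]
    simp only [pvVal]
    split <;> simp
  | case3 c cs hc ih =>
    rw [nfrB_go]
    simp only [hc, Bool.false_eq_true, if_false]
    have hsplit : (c :: cs).takeWhile (fun d => !nfrB_isEmpty d) ++
        (c :: cs).dropWhile (fun d => !nfrB_isEmpty d) = c :: cs :=
      List.takeWhile_append_dropWhile (p := fun d => !nfrB_isEmpty d) (l := c :: cs)
    have hall : ∀ d ∈ (c :: cs).takeWhile (fun d => !nfrB_isEmpty d), nfrB_isEmpty d = false :=
      fun d hd => by simpa using List.mem_takeWhile_imp hd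
    rw [List.flatten_cons, ih]
    conv_rhs => rw [← hsplit, pvRest_piece_run _ _ hall]

-- ===== VERDICT (by name: the statement is the Claim_ definition above) =====
theorem normalize_fen_rank_py_spec : Claim_equal_normalize_fen_rank_py := by
  intro rank _
  unfold Spec_normalize_fen_rank_py normalize_fen_rank_py normalize_fen_rank_py_alt
  simp only [pvJoinNil, nfrB_char]
  have hA := nfrA_char rank.toList [] 0
  simp only [nfrA_fin, List.flatten_nil, List.nil_append] at hA
  rw [hA]
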